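-- pv_equiv track=rewrite | github.com/szexian96/Algorithm-practice | Big O/ex2.py | parSumSequence
-- ===== SOURCE A (Python) =====
-- def parSumSequence(n):
--     sum = 0
--     j = 0
--     count = int(n)
--     for i in range(count):
--         sum += pairSum(j, j + 1)
--         j += 1
--     return sum
--
-- def pairSum(a, b):
-- 	return a + b
-- ===== SOURCE B (Python) =====
-- def parSumSequence(n):
--     # closed form: sum_{j=0}^{n-1} (j + (j+1)) = n^2 for n >= 0, and 0 for n < 0
--     m = max(int(n), 0)
--     return m * m
-- ===== Notes on version B (the rewrite author's own statement) =====
-- stated objective: faster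
-- what changed: Replaced the O(n) loop summing pairSum(j, j+1) with the closed form max(n,0)^2.
import Mathlib
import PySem

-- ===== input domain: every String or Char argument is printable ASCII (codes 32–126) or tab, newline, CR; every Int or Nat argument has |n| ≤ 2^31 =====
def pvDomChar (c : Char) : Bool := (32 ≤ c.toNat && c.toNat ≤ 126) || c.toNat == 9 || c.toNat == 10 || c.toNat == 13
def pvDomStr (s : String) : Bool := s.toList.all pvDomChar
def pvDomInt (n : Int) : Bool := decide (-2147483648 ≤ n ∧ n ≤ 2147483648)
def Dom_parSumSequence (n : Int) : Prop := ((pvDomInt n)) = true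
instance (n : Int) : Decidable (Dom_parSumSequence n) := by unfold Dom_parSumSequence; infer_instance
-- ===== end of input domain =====

-- ===== PORT A =====
-- literal port of A: loop over range(int(n)), accumulating sum += pairSum(j, j+1); j += 1
def pairSumA (a b : Int) : Int := a + b

def parSumSequence (n : Int) : Int :=
  (PySem.List.pyRange 0 n 1).foldl
    (fun (st : Int × Int) _ => (st.1 + pairSumA st.2 (st.2 + 1), st.2 + 1)) (0, 0) |>.1

-- ===== PORT B =====
-- port of B: closed form max(n,0)^2
def parSumSequence_alt (n : Int) : Int :=
  max n 0 * max n 0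

-- ===== PRECONDITION & SPEC =====
def Spec_parSumSequence (n : Int) (out : Int) : Prop := out = parSumSequence_alt n
instance (n : Int) (out : Int) : Decidable (Spec_parSumSequence n out) := by unfold Spec_parSumSequence; infer_instance

-- ===== CLAIM (what is proved, stated in full; the proofs are below) =====
def Claim_equal_parSumSequence : Prop := ∀ (n : Int), Dom_parSumSequence n → Spec_parSumSequence n (parSumSequence n)

-- ===== LEMMAS AND PROOFS =====

-- ===== VERDICT (by name: the statement is the Claim_ definition above) =====
-- loop invariant: folding over any list of length L from state (s, j) adds 2*j*L + L^2 to s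
theorem parSum_foldl (l : List Int) : ∀ (s j : Int),
    (l.foldl (fun (st : Int × Int) _ => (st.1 + pairSumA st.2 (st.2 + 1), st.2 + 1)) (s, j))
      = (s + 2 * j * l.length + l.length * l.length, j + l.length) := by
  induction l with
  | nil => intro s j; simp
  | cons a t ih =>
      intro s j
      simp only [List.foldl_cons, List.length_cons, ih]
      simp only [pairSumA, Prod.mk.injEq]
      push_cast
      constructor <;> ring

theorem parSumSequence_spec : Claim_equal_parSumSequence := by
  intro n _
  unfold Spec_parSumSequence parSumSequence parSumSequence_alt
  rw [parSum_foldl]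
  by_cases h : n ≤ 0
  · rw [show PySem.List.pyRange 0 n 1 = [] from by
      simp [PySem.List.pyRange]; omega]
    simp [max_eq_right h]
  · have hlen : ((PySem.List.pyRange 0 n 1).length : Int) = n := by
      simp [PySem.List.length_pyRange_one]; omega
    rw [max_eq_left (by omega : (0:Int) ≤ n)]
    push_cast [hlen]
    ring
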